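-- pv_equiv track=rewrite | github.com/V1adi1ena/Artificial-Intelligence-Class-Lab | Lab4/hw04.py | split_func
-- ===== SOURCE A (Python) =====
-- def split_func(func):
--     args = []
--     start = func.find('(')
--     func_name = func[:start]
--
--     inner = func[start + 1 : func.rfind(')')]
--     depth = 0
--     current = ''
--     for ch in inner:
--         if ch == '(':
--             depth += 1
--             current += ch
--         elif ch == ')':
--             depth -= 1
--             current += ch
--         elif ch == ',' and depth == 0:
--             args.append(current.strip())
--             current = ''
--         else:
--             current += ch
--     if current.strip():
--         args.append(current.strip())
--
--     return func_name, args
-- ===== SOURCE B (Python) =====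
-- def _segments(s):
--     depth = 0
--     for i, ch in enumerate(s):
--         if ch == '(':
--             depth += 1
--         elif ch == ')':
--             depth -= 1
--         elif ch == ',' and depth == 0:
--             return [s[:i].strip()] + _segments(s[i + 1:])
--     t = s.strip()
--     return [t] if t else []
--
--
-- def split_func(func):
--     start = func.find('(')
--     inner = func[start + 1 : func.rfind(')')]
--     return func[:start], _segments(inner)
-- ===== Notes on version B (the rewrite author's own statement) =====
-- stated objective: alternative
-- what changed: A's single accumulator loop (args/depth/current state with a final conditional append) is replaced by recursive head-splitting: find the first depth-0 comma, slice off and strip the head segment, recurse on the remainder, keeping the final segment only if non-empty after stripping.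
import Mathlib
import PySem

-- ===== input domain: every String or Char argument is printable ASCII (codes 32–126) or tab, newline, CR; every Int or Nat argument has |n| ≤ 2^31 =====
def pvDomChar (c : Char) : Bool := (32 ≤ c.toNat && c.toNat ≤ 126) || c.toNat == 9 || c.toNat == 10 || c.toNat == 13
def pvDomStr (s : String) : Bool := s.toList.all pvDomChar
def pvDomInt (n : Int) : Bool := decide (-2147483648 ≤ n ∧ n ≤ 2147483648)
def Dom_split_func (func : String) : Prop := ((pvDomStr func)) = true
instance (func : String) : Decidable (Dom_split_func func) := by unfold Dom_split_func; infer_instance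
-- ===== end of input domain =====

-- B re-implements the arg splitter by recursive head-splitting at the first depth-0 comma
-- instead of A's single accumulator loop; same return value, similar cost (objective: alternative).

-- ===== PORT A =====

-- one iteration of A's for-loop over `inner`; state = (args, depth, current)
def sfStep (st : List String × Int × List Char) (ch : Char) : List String × Int × List Char :=
  match st with
  | (args, depth, current) =>
    if ch = '(' then (args, depth + 1, current ++ [ch])
    else if ch = ')' then (args, depth - 1, current ++ [ch])
    else if ch = ',' ∧ depth = 0 then
      (args ++ [String.ofList (PySem.Chars.strip current)], depth, [])
    else (args, depth, current ++ [ch])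

def split_func (func : String) : String × List String :=
  let s := func.toList
  let start := PySem.Chars.find s ['(']
  let func_name := PySem.Chars.slice s none (some start)
  let inner := PySem.Chars.slice s (some (start + 1)) (some (PySem.Chars.rfind s [')']))
  let st := inner.foldl sfStep ([], 0, [])
  let args :=
    if PySem.Chars.strip st.2.2 ≠ [] then st.1 ++ [String.ofList (PySem.Chars.strip st.2.2)]
    else st.1
  (String.ofList func_name, args)

-- ===== PORT B =====

-- index (as an offset into s) of the first comma at paren depth 0, as B's for-loop finds it
def sfComma (d : Int) : List Char → Option Nat
  | [] => none
  | ch :: rest =>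
    if ch = '(' then (sfComma (d + 1) rest).map (· + 1)
    else if ch = ')' then (sfComma (d - 1) rest).map (· + 1)
    else if ch = ',' ∧ d = 0 then some 0
    else (sfComma d rest).map (· + 1)

theorem sfComma_lt_length (d : Int) (s : List Char) (i : Nat) (h : sfComma d s = some i) :
    i < s.length := by
  induction s generalizing d i with
  | nil => simp [sfComma] at h
  | cons ch rest ih =>
    simp only [sfComma] at h
    split_ifs at h with h1 h2 h3
    · rcases Option.map_eq_some_iff.mp h with ⟨j, hj, rfl⟩
      have := ih _ _ hj; simp; omega
    · rcases Option.map_eq_some_iff.mp h with ⟨j, hj, rfl⟩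
      have := ih _ _ hj; simp; omega
    · cases h; simp
    · rcases Option.map_eq_some_iff.mp h with ⟨j, hj, rfl⟩
      have := ih _ _ hj; simp; omega

-- B's _segments: split off the head segment at the first depth-0 comma and recurse
def sfSegments (s : List Char) : List String :=
  match h : sfComma 0 s with
  | some i =>
    String.ofList (PySem.Chars.strip (s.take i)) :: sfSegments (s.drop (i + 1))
  | none =>
    let t := PySem.Chars.strip s
    if t ≠ [] then [String.ofList t] else []
termination_by s.length
decreasing_by
  have := sfComma_lt_length 0 s i h
  simp; omega

def split_func_alt (func : String) : String × List String :=
  let s := func.toList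
  let start := PySem.Chars.find s ['(']
  let inner := PySem.Chars.slice s (some (start + 1)) (some (PySem.Chars.rfind s [')']))
  (String.ofList (PySem.Chars.slice s none (some start)), sfSegments inner)

-- ===== PRECONDITION & SPEC =====
def Spec_split_func (func : String) (out : String × List String) : Prop := out = split_func_alt func
instance (func : String) (out : String × List String) : Decidable (Spec_split_func func out) := by unfold Spec_split_func; infer_instance

-- ===== CLAIM (what is proved, stated in full; the proofs are below) =====
def Claim_equal_split_func : Prop := ∀ (func : String), Dom_split_func func → Spec_split_func func (split_func func)

-- ===== LEMMAS AND PROOFS =====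

-- A's finalisation of the loop state
def sfFinish (st : List String × Int × List Char) : List String :=
  if PySem.Chars.strip st.2.2 ≠ [] then st.1 ++ [String.ofList (PySem.Chars.strip st.2.2)]
  else st.1

-- what B produces from a mid-scan state (depth d, pending chars cur, remaining s)
def sfRest (d : Int) (cur s : List Char) : List String :=
  match sfComma d s with
  | some i => String.ofList (PySem.Chars.strip (cur ++ s.take i)) :: sfSegments (s.drop (i + 1))
  | none =>
    if PySem.Chars.strip (cur ++ s) ≠ [] then [String.ofList (PySem.Chars.strip (cur ++ s))]
    else []

theorem sfRest_comma (cur rest : List Char) :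
    sfRest 0 cur (',' :: rest) = String.ofList (PySem.Chars.strip cur) :: sfSegments rest := by
  simp [sfRest, sfComma]

theorem sfSegments_eq_sfRest (s : List Char) : sfSegments s = sfRest 0 [] s := by
  rw [sfSegments]
  unfold sfRest
  cases h : sfComma 0 s <;> simp

theorem sfLoop_eq_sfRest (s : List Char) :
    ∀ (d : Int) (args : List String) (cur : List Char),
    sfFinish (s.foldl sfStep (args, d, cur)) = args ++ sfRest d cur s := by
  induction s with
  | nil =>
    intro d args cur
    simp only [List.foldl_nil, sfFinish, sfRest, sfComma, List.append_nil]
    split_ifs <;> simp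
  | cons ch rest ih =>
    intro d args cur
    simp only [List.foldl_cons, sfStep]
    split_ifs with h1 h2 h3
    · rw [ih]
      simp only [sfRest, sfComma, if_pos h1]
      cases h : sfComma (d + 1) rest <;> simp [List.append_assoc]
    · rw [ih]
      simp only [sfRest, sfComma, if_neg h1, if_pos h2]
      cases h : sfComma (d - 1) rest <;> simp [List.append_assoc]
    · obtain ⟨rfl, rfl⟩ := h3
      rw [ih, sfRest_comma, ← sfSegments_eq_sfRest]
      simp
    · rw [ih]
      simp only [sfRest, sfComma, if_neg h1, if_neg h2, if_neg h3]
      cases h : sfComma d rest <;> simp [List.append_assoc]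

-- ===== VERDICT (by name: the statement is the Claim_ definition above) =====
theorem split_func_spec : Claim_equal_split_func := by
  intro func _
  unfold Spec_split_func split_func split_func_alt
  have h := sfLoop_eq_sfRest
      (PySem.Chars.slice func.toList (some (PySem.Chars.find func.toList ['('] + 1))
        (some (PySem.Chars.rfind func.toList [')']))) 0 [] []
  simp only [sfFinish] at h
  simp only [h, sfSegments_eq_sfRest, List.nil_append]
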